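-- pv_equiv track=rewrite | github.com/peterjdavis/sam-cfn-publish | sam_cfn_publish/helpers.py | get_key_from_code_uri
-- ===== SOURCE A (Python) =====
-- def get_key_from_code_uri(code_uri):
--     key_parts = code_uri.split('/')
--
--     key = ''
--     for i in range(3, len(key_parts)):
--         if key == '':
--             key = key_parts[i]
--         else:
--             key = key + '/' + key_parts[i]
--     return key
-- ===== SOURCE B (Python) =====
-- def get_key_from_code_uri(code_uri):
--     # Scan past the first three '/' delimiters instead of building a parts list,
--     # then return the remainder with any leading delimiter run skipped.
--     rest = code_uri
--     for _ in range(3):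
--         i = rest.find('/')
--         if i == -1:
--             return ''
--         rest = rest[i + 1:]
--     while rest.startswith('/'):
--         rest = rest[1:]
--     return rest
-- ===== Notes on version B (the rewrite author's own statement) =====
-- stated objective: alternative
-- what changed: B never builds the parts list: it scans the string, repeatedly finding the next '/' to skip past the first three delimiters, then skips the leading delimiter run and returns the remaining suffix, where A splits into a list and re-joins the parts from index 3 with an accumulator loop.
import Mathlib
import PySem

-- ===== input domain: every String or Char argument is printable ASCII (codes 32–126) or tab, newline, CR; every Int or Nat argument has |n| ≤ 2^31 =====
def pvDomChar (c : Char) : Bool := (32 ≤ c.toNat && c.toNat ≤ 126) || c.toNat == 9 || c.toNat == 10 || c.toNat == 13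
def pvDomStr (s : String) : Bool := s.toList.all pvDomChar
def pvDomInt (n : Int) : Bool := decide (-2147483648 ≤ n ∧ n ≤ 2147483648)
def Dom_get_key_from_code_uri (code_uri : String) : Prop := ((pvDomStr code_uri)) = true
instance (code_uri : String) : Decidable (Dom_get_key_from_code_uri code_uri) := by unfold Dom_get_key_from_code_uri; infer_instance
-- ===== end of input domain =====

-- B scans for the third '/' and returns the suffix (skipping the delimiter run) instead of
-- building a parts list with split and joining it; alternative decomposition, same cost.

-- ===== PORT A =====
def get_key_from_code_uri (code_uri : String) : String :=
  let key_parts : List String :=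
    match PySem.Str.split? code_uri "/" with
    | some ps => ps
    | none => []  -- unreachable: the separator "/" is non-empty
  List.foldl
    (fun key i =>
      if key = "" then PySem.List.pyGetD key_parts i ""
      else key ++ "/" ++ PySem.List.pyGetD key_parts i "")
    "" (PySem.List.pyRange 3 (PySem.List.len key_parts))

-- ===== PORT B =====
-- hand port (exact) of Source B's `while rest.startswith('/'): rest = rest[1:]`:
-- startswith('/') on a string is "first char is '/'", and rest[1:] is the tail
def pvStripSlashes : List Char → List Char
  | [] => []
  | c :: r => if c = '/' then pvStripSlashes r else c :: r

-- one iteration of Source B's for-loop body: find('/') then slice past it; none = early `return ''`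
def pvStep (rest : String) : Option String :=
  let i := PySem.Str.find rest "/"
  if i = -1 then none else some (PySem.Str.slice rest (some (i + 1)) none)

def get_key_from_code_uri_alt (code_uri : String) : String :=
  match ((some code_uri).bind pvStep |>.bind pvStep |>.bind pvStep) with
  | none => ""
  | some rest => String.ofList (pvStripSlashes rest.toList)

-- ===== PRECONDITION & SPEC =====
def Spec_get_key_from_code_uri (code_uri : String) (out : String) : Prop := out = get_key_from_code_uri_alt code_uri
instance (code_uri : String) (out : String) : Decidable (Spec_get_key_from_code_uri code_uri out) := by unfold Spec_get_key_from_code_uri; infer_instance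

-- ===== CLAIM (what is proved, stated in full; the proofs are below) =====
def Claim_equal_get_key_from_code_uri : Prop := ∀ (code_uri : String), Dom_get_key_from_code_uri code_uri → Spec_get_key_from_code_uri code_uri (get_key_from_code_uri code_uri)

-- ===== LEMMAS AND PROOFS =====

-- simple structural split on '/' used as the common reference point of both proofs
def split1 : List Char → List (List Char)
  | [] => [[]]
  | c :: r =>
    if c = '/' then [] :: split1 r
    else
      match split1 r with
      | [] => [[c]]
      | p :: ps => (c :: p) :: ps

theorem intercalate_cc (x y : List Char) (xs : List (List Char)) :
    List.intercalate ['/'] (x :: y :: xs) = x ++ '/' :: List.intercalate ['/'] (y :: xs) := by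
  simp [List.intercalate, List.intersperse]

theorem split1_ne_nil (l : List Char) : split1 l ≠ [] := by
  induction l with
  | nil => simp [split1]
  | cons c r ih =>
    simp only [split1]
    split
    · simp
    · cases h : split1 r <;> simp

theorem split1_no_slash (l : List Char) : ∀ p ∈ split1 l, '/' ∉ p := by
  induction l with
  | nil => simp [split1]
  | cons c r ih =>
    simp only [split1]
    split
    · rename_i hc
      simp only [List.mem_cons]
      intro p hp
      rcases hp with rfl | hp
      · simp
      · exact ih p hp
    · rename_i hc
      cases h : split1 r with
      | nil => exact absurd h (split1_ne_nil r)
      | cons p ps =>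
        rw [h] at ih
        intro q hq
        rcases List.mem_cons.mp hq with rfl | hm
        · intro hmem
          rcases List.mem_cons.mp hmem with h1 | hp
          · exact hc h1.symm
          · exact ih p (by simp) hp
        · exact ih q (by simp [hm])

theorem intercalate_split1 (l : List Char) : List.intercalate ['/'] (split1 l) = l := by
  induction l with
  | nil => simp [split1, List.intercalate]
  | cons c r ih =>
    simp only [split1]
    split
    · rename_i hc
      subst hc
      cases h : split1 r with
      | nil => exact absurd h (split1_ne_nil r)
      | cons p ps =>
        rw [h] at ih
        rw [intercalate_cc]
        simp [ih]
    · cases h : split1 r with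
      | nil => exact absurd h (split1_ne_nil r)
      | cons p ps =>
        rw [h] at ih
        cases ps with
        | nil => simp [List.intercalate] at ih ⊢; simp [ih]
        | cons q qs => rw [intercalate_cc] at ih ⊢; simp [ih]

theorem split1_no_slash_self (l : List Char) (h : '/' ∉ l) : split1 l = [l] := by
  induction l with
  | nil => simp [split1]
  | cons c r ih =>
    simp only [split1]
    rw [if_neg (by intro hc; exact h (hc ▸ List.mem_cons_self ..)),
        ih (fun hm => h (List.mem_cons_of_mem _ hm))]

theorem split1_append (t r : List Char) (h : '/' ∉ t) :
    split1 (t ++ '/' :: r) = t :: split1 r := by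
  induction t with
  | nil => simp [split1]
  | cons c t ih =>
    simp only [List.cons_append, split1]
    rw [if_neg (by intro hc; exact h (hc ▸ List.mem_cons_self ..)),
        ih (fun hm => h (List.mem_cons_of_mem _ hm))]

theorem go_cons (f : Nat) (c : Char) (rest cur : List Char) (acc : List (List Char)) :
    PySem.Chars.splitOn.go ['/'] (f+1) (c :: rest) cur acc
      = if c = '/' then PySem.Chars.splitOn.go ['/'] f rest [] (cur.reverse :: acc)
        else PySem.Chars.splitOn.go ['/'] f rest (c :: cur) acc := by
  rw [PySem.Chars.splitOn.go]
  simp only [List.isPrefixOf, Bool.and_true, List.length_cons, List.drop_succ_cons]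
  by_cases hc : c = '/'
  · subst hc; simp
  · simp [hc, Ne.symm hc]

theorem go_nil (f : Nat) (cur : List Char) (acc : List (List Char)) :
    PySem.Chars.splitOn.go ['/'] (f+1) [] cur acc = (cur.reverse :: acc).reverse := by
  rw [PySem.Chars.splitOn.go]
  simp

theorem splitOn_go_eq (fuel : Nat) (l cur : List Char) (acc : List (List Char))
    (h : l.length < fuel) :
    PySem.Chars.splitOn.go ['/'] fuel l cur acc
      = acc.reverse ++ (split1 l).modifyHead (cur.reverse ++ ·) := by
  induction fuel generalizing l cur acc with
  | zero => omega
  | succ f ih =>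
    cases l with
    | nil => rw [go_nil]; simp [split1]
    | cons c rest =>
      rw [go_cons]
      by_cases hc : c = '/'
      · subst hc
        rw [if_pos rfl, ih rest [] _ (by simpa using h)]
        rw [show (List.modifyHead (fun x => (([] : List Char).reverse) ++ x) (split1 rest)) = split1 rest by
          cases split1 rest <;> simp]
        simp [split1]
      · rw [if_neg hc, ih rest (c :: cur) acc (by simpa using h)]
        simp only [split1, if_neg hc]
        cases hs : split1 rest with
        | nil => exact absurd hs (split1_ne_nil rest)
        | cons p ps => simp

theorem splitOn_eq (l : List Char) : PySem.Chars.splitOn l ['/'] = split1 l := by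
  rw [PySem.Chars.splitOn, splitOn_go_eq _ _ _ _ (by omega)]
  cases hs : split1 l with
  | nil => exact absurd hs (split1_ne_nil l)
  | cons p ps => simp

theorem pvStripSlashes_eq (l : List Char) :
    pvStripSlashes l = l.dropWhile (fun c => c == '/') := by
  induction l with
  | nil => rfl
  | cons c r ih =>
    simp only [pvStripSlashes, List.dropWhile_cons]
    by_cases hc : c = '/' <;> simp [hc, ih]

theorem singleton_infix_iff (l : List Char) : ['/'] <:+: l ↔ '/' ∈ l := by
  constructor
  · intro ⟨s, t, h⟩
    subst h; simp
  · intro h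
    obtain ⟨s, t, h⟩ := List.append_of_mem h
    exact ⟨s, t, by simp [h]⟩

theorem pvStep_none {rest : String} (h : pvStep rest = none) :
    split1 rest.toList = [rest.toList] := by
  apply split1_no_slash_self
  rw [← singleton_infix_iff, ← PySem.Chars.find_nonneg_iff]
  simp only [pvStep, PySem.Str.find_eq, show ("/" : String).toList = ['/'] from rfl] at h
  intro hge
  rw [if_neg (by omega)] at h
  exact Option.some_ne_none _ h

theorem pvStep_some {rest r' : String} (h : pvStep rest = some r') :
    ∃ t, '/' ∉ t ∧ split1 rest.toList = t :: split1 r'.toList := by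
  simp only [pvStep, PySem.Str.find_eq, show ("/" : String).toList = ['/'] from rfl] at h
  set l := rest.toList with hl
  by_cases hne : PySem.Chars.find l ['/'] = -1
  · rw [if_pos hne] at h; exact absurd h (by simp)
  rw [if_neg hne] at h
  have hge : 0 ≤ PySem.Chars.find l ['/'] := by
    have := PySem.Chars.neg_one_le_find l ['/']
    omega
  obtain ⟨hpre, hmin⟩ := PySem.Chars.find_spec hge
  set n := (PySem.Chars.find l ['/']).toNat with hn
  -- l = take n l ++ '/' :: drop (n+1) l
  obtain ⟨u, hu⟩ := hpre
  have hdn : l.drop n = '/' :: u := hu.symm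
  have hdn1 : l.drop (n + 1) = u := by
    have h1 := congrArg (List.drop 1) hdn
    rw [List.drop_drop] at h1
    simp at h1
    exact h1
  have hdropn : l.drop n = '/' :: l.drop (n + 1) := by rw [hdn, hdn1]
  have hsplit : l = l.take n ++ '/' :: l.drop (n + 1) := by
    conv_lhs => rw [← List.take_append_drop n l]
    rw [hdropn]
  have hnot : '/' ∉ l.take n := by
    intro hmem
    obtain ⟨i, hi, hget⟩ := List.getElem_of_mem hmem
    have hilt : i < n := lt_of_lt_of_le hi (by simp)
    have hlen : i < l.length := lt_of_lt_of_le hi (by simp)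
    apply hmin i hilt
    refine ⟨l.drop (i + 1), ?_⟩
    rw [List.drop_eq_getElem_cons hlen]
    rw [List.getElem_take] at hget
    rw [hget]
    rfl
  -- the slice is drop (n+1)
  have hr0 : r' = PySem.Str.slice rest (some (PySem.Chars.find l ['/'] + 1)) :=
    (Option.some.inj h).symm
  have hr' : r'.toList = l.drop (n + 1) := by
    rw [hr0, PySem.Str.toList_slice]
    have he : PySem.Chars.find l ['/'] + 1 = ((n + 1 : Nat) : Int) := by push_cast; omega
    rw [he, hl]
    exact PySem.List.slice_from _ (by positivity)
  refine ⟨l.take n, hnot, ?_⟩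
  rw [hr']
  conv_lhs => rw [hsplit]
  exact split1_append _ _ hnot

-- the A-side loop body on character lists
def foldA (ps : List (List Char)) : List Char :=
  ps.foldl (fun k p => if k = [] then p else k ++ '/' :: p) []

theorem foldl_ne_nil (ps : List (List Char)) (k : List Char) (hk : k ≠ []) :
    ps.foldl (fun k p => if k = [] then p else k ++ '/' :: p) k
      = k ++ ps.flatMap (fun p => '/' :: p) := by
  induction ps generalizing k with
  | nil => simp
  | cons p ps ih =>
    simp only [List.foldl_cons, if_neg hk, List.flatMap_cons]
    rw [ih _ (by simp)]
    simp

theorem intercalate_flatMap (p : List Char) (ps : List (List Char)) :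
    List.intercalate ['/'] (p :: ps) = p ++ ps.flatMap (fun q => '/' :: q) := by
  induction ps generalizing p with
  | nil => simp [List.intercalate]
  | cons q qs ih =>
    rw [intercalate_cc, ih]
    simp

theorem foldA_eq_dropWhile (ps : List (List Char)) (h : ∀ p ∈ ps, '/' ∉ p) :
    foldA ps = (List.intercalate ['/'] ps).dropWhile (fun c => c == '/') := by
  induction ps with
  | nil => simp [foldA, List.intercalate]
  | cons p ps ih =>
    by_cases hp : p = []
    · subst hp
      have h1 : foldA ([] :: ps) = foldA ps := by simp [foldA]
      rw [h1, ih (fun q hq => h q (List.mem_cons_of_mem _ hq))]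
      cases ps with
      | nil => simp [List.intercalate]
      | cons q qs =>
        rw [intercalate_cc]
        simp
    · have hA : foldA (p :: ps) = p ++ ps.flatMap (fun q => '/' :: q) := by
        simp only [foldA, List.foldl_cons]
        exact foldl_ne_nil ps p hp
      rw [hA, intercalate_flatMap]
      cases p with
      | nil => exact absurd rfl hp
      | cons c p' =>
        have hc : ¬ (c == '/') = true := by
          simp only [beq_iff_eq]
          intro hc
          exact h (c :: p') (List.mem_cons_self ..) (hc ▸ List.mem_cons_self ..)
        simp [hc]

theorem toList_foldA (ss : List String) (init : String) :
    (ss.foldl (fun key p => if key = "" then p else key ++ "/" ++ p) init).toList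
      = (ss.map String.toList).foldl (fun k p => if k = [] then p else k ++ '/' :: p) init.toList := by
  induction ss generalizing init with
  | nil => simp
  | cons p ps ih =>
    simp only [List.foldl_cons, List.map_cons, ih]
    congr 1
    by_cases h : init = ""
    · simp [h]
    · rw [if_neg h, if_neg (by simpa [String.toList_eq_nil_iff] using h)]
      simp

theorem a_eq (code_uri : String) :
    (get_key_from_code_uri code_uri).toList = foldA ((split1 code_uri.toList).drop 3) := by
  have hsplit : PySem.Str.split? code_uri "/"
      = some ((split1 code_uri.toList).map String.ofList) := by
    rw [PySem.Str.split?.eq_1, PySem.Chars.split?.eq_1]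
    simp [splitOn_eq]
  unfold get_key_from_code_uri
  rw [hsplit]
  simp only
  rw [PySem.List.foldl_pyRange_pyGetD ((split1 code_uri.toList).map String.ofList) ""
    (fun key p => if key = "" then p else key ++ "/" ++ p) "" (by norm_num)]
  rw [toList_foldA]
  simp only [show ((3:Int)).toNat = 3 from rfl, List.map_drop, List.map_map]
  rw [show (String.toList ∘ String.ofList) = id by funext l; simp]
  simp [foldA]

theorem b_eq (code_uri : String) :
    (get_key_from_code_uri_alt code_uri).toList = foldA ((split1 code_uri.toList).drop 3) := by
  unfold get_key_from_code_uri_alt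
  cases h1 : pvStep code_uri with
  | none =>
    rw [pvStep_none h1]
    simp [h1, foldA]
  | some r1 =>
    obtain ⟨t1, ht1, hs1⟩ := pvStep_some h1
    cases h2 : pvStep r1 with
    | none =>
      rw [hs1, pvStep_none h2]
      simp [h1, h2, foldA]
    | some r2 =>
      obtain ⟨t2, ht2, hs2⟩ := pvStep_some h2
      cases h3 : pvStep r2 with
      | none =>
        rw [hs1, hs2, pvStep_none h3]
        simp [h1, h2, h3, foldA]
      | some r3 =>
        obtain ⟨t3, ht3, hs3⟩ := pvStep_some h3
        rw [hs1, hs2, hs3]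
        simp only [Option.bind_some, h1, h2, h3, List.drop_succ_cons, List.drop_zero]
        rw [String.toList_ofList, pvStripSlashes_eq,
            foldA_eq_dropWhile _ (split1_no_slash r3.toList), intercalate_split1]

-- ===== VERDICT (by name: the statement is the Claim_ definition above) =====
theorem get_key_from_code_uri_spec : Claim_equal_get_key_from_code_uri := by
  intro code_uri _
  unfold Spec_get_key_from_code_uri
  rw [← String.toList_inj, a_eq, b_eq]
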